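-- pv_equiv track=rewrite | github.com/irisich/system-analysis-misis2025w | task3/task.py | parse
-- ===== SOURCE A (Python) =====
-- def parse(s: str) -> dict:
--     index_map = {}
--     index = 0
--     i = 0
--     n = len(s)
--
--     while i < n:
--         if s[i] == '[':
--             # найдем конец группы
--             j = s.find(']', i)
--             if j == -1:
--                 raise ValueError("Нет закрывающей скобки ']'")
--             content = s[i+1:j]
--             # разделим на токены внутри группы (учитываем пробелы)
--             items = [t.strip() for t in content.split(',') if t.strip() != ""]
--             for tok in items:
--                 index_map[tok] = index
--             index += 1
--             i = j + 1
--         elif s[i] == ',' or s[i].isspace():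
--             i += 1
--         else:
--             # одиночный токен (до запятой или до следующей '[')
--             start = i
--             while i < n and s[i] not in ',[':
--                 i += 1
--             tok = s[start:i].strip()
--             if tok:
--                 index_map[tok] = index
--                 index += 1
--             # не делаем i += 1 здесь — цикл продолжит с текущей позиции
--     return index_map
-- ===== SOURCE B (Python) =====
-- def parse(s: str) -> dict:
--     # Region-at-a-time: partition off the text before each '[' group instead of
--     # scanning character by character with a manual index.
--     index_map = {}
--     index = 0
--     rest = s
--     while True:
--         bare, sep, rest = rest.partition('[')
--         for t in bare.split(','):
--             t = t.strip()
--             if t: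
--                 index_map[t] = index
--                 index += 1
--         if not sep:
--             break
--         content, sep2, rest = rest.partition(']')
--         if not sep2:
--             raise ValueError("Нет закрывающей скобки ']'")
--         for t in content.split(','):
--             t = t.strip()
--             if t:
--                 index_map[t] = index
--         index += 1
--     return index_map
-- ===== Notes on version B (the rewrite author's own statement) =====
-- stated objective: idiomatic
-- what changed: B replaces A's manual character-index while loop (find, slicing, per-character space/comma skipping, an inner per-character token-scanning loop) by a region-at-a-time pass: it repeatedly partitions the remainder at the next '[', handles the whole bare region with split(',')+strip, then partitions off the bracket group at the next ']' and handles its content the same way; Pre_ excludes strings with an unmatched '[', on which both A and B raise ValueError.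
import Mathlib
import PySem

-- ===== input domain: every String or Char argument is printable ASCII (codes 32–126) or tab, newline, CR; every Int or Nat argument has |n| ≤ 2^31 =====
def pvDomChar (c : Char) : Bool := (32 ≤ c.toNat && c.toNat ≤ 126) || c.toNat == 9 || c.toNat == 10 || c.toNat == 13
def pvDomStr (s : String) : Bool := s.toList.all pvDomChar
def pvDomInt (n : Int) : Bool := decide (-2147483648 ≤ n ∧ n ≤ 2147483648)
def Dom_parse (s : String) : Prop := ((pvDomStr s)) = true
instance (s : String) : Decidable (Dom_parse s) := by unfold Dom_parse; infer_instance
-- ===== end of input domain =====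

-- B rewrites A's character-index scan as a region-at-a-time partition pass (idiomatic, same cost);
-- equivalence is proved on Pre_parse (no unmatched '['), where A returns instead of raising ValueError.

-- ===== PORT A =====
-- A's inner `while i < n and s[i] not in ',['` of the bare-token branch
def parseInner (cs : List Char) (i : Nat) : Nat :=
  if h : i < cs.length then
    if cs[i] = ',' ∨ cs[i] = '[' then i else parseInner cs (i + 1)
  else i
termination_by cs.length - i

-- A's outer `while i < n` loop; fuel = one unit per iteration (i strictly increases, so
-- cs.length + 1 units suffice).  On the ValueError branch (no closing ']', excluded by
-- Pre_parse) it returns the dict built so far.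
def parseLoop (fuel : Nat) (cs : List Char) (i : Nat) (d : PySem.Dict String Int)
    (index : Int) : PySem.Dict String Int :=
  match fuel with
  | 0 => d
  | fuel + 1 =>
    if h : i < cs.length then
      if cs[i] = '[' then
        let j := PySem.Chars.findFrom cs [']'] (i : Int)
        if j = -1 then d
        else
          let content := PySem.Chars.slice cs (some ((i : Int) + 1)) (some j)
          let items := ((PySem.Chars.splitOn content [',']).map PySem.Chars.strip).filter (· ≠ [])
          let d' := items.foldl (fun acc tok => acc.insert (String.ofList tok) index) d
          parseLoop fuel cs (j.toNat + 1) d' (index + 1)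
      else if cs[i] = ',' ∨ PySem.Chars.isspace cs[i] then
        parseLoop fuel cs (i + 1) d index
      else
        let stop := parseInner cs i
        let tok := PySem.Chars.strip (PySem.Chars.slice cs (some (i : Int)) (some (stop : Int)))
        if tok = [] then parseLoop fuel cs stop d index
        else parseLoop fuel cs stop (d.insert (String.ofList tok) index) (index + 1)
    else d

def parse (s : String) : List (String × Int) :=
  (parseLoop (s.toList.length + 1) s.toList 0 PySem.Dict.empty 0).items

-- ===== PORT B =====
-- one `t = t.strip(); if t: index_map[t] = index; index += 1` step of Source B's bare-region loop
def altBareStep (p : PySem.Dict String Int × Int) (t : List Char) :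
    PySem.Dict String Int × Int :=
  let t' := PySem.Chars.strip t
  if t' = [] then p else (p.1.insert (String.ofList t') p.2, p.2 + 1)

-- Source B's `while True` loop.  `rest.partition(c)` for the single-character separators '[' and
-- ']' is ported by hand, exactly: (takeWhile (· ≠ c), dropWhile (· ≠ c)) — the text before the
-- first occurrence, and the occurrence plus the rest (empty iff the separator is absent, which
-- is Python's `if not sep` test).  On Source B's ValueError branch (no closing ']', excluded by
-- Pre_parse) it returns the dict built so far.
def altLoop (t : List Char) (d : PySem.Dict String Int) (index : Int) :
    PySem.Dict String Int :=
  let bare := t.takeWhile (· ≠ '[')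
  let rest1 := t.dropWhile (· ≠ '[')
  let p := (PySem.Chars.splitOn bare [',']).foldl altBareStep (d, index)
  if h1 : rest1 = [] then p.1
  else
    let content := rest1.tail.takeWhile (· ≠ ']')
    let rest2 := rest1.tail.dropWhile (· ≠ ']')
    if h2 : rest2 = [] then p.1
    else
      altLoop rest2.tail
        ((PySem.Chars.splitOn content [',']).foldl
          (fun d t =>
            let t' := PySem.Chars.strip t
            if t' = [] then d else d.insert (String.ofList t') p.2) p.1)
        (p.2 + 1)
termination_by t.length
decreasing_by
  have h1l : 0 < rest1.length := List.length_pos_iff.mpr h1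
  have h2l : 0 < rest2.length := List.length_pos_iff.mpr h2
  have hA := List.length_dropWhile_le (fun x => decide (x ≠ '[')) t
  have hB := List.length_dropWhile_le (fun x => decide (x ≠ ']')) rest1.tail
  simp only [rest2, rest1, List.length_tail] at *
  omega

def parse_alt (s : String) : List (String × Int) :=
  (altLoop s.toList PySem.Dict.empty 0).items

-- ===== PRECONDITION & SPEC =====
-- Pre_parse excludes exactly the strings containing a '[' with no ']' at or after it:
-- there both A and B raise ValueError ("Нет закрывающей скобки ']'").
def Pre_parse (s : String) : Prop :=
  ∀ i < s.toList.length, s.toList[i]? = some '[' →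
    ∃ j < s.toList.length, i ≤ j ∧ s.toList[j]? = some ']'
instance (s : String) : Decidable (Pre_parse s) := by unfold Pre_parse; infer_instance
def pvWitness_parse : String := "a, [b ,c] x[d]"
def Spec_parse (s : String) (out : List (String × Int)) : Prop := out = parse_alt s
instance (s : String) (out : List (String × Int)) : Decidable (Spec_parse s out) := by
  unfold Spec_parse; infer_instance

-- ===== CLAIM (what is proved, stated in full; the proofs are below) =====
def Claim_equal_parse : Prop := ∀ (s : String), Dom_parse s → Pre_parse s → Spec_parse s (parse s)

-- ===== LEMMAS AND PROOFS =====

-- structural version of Python's split on a single-character separator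
def mySplit (c : Char) : List Char → List (List Char)
  | [] => [[]]
  | x :: r => if x = c then [] :: mySplit c r else (mySplit c r).modifyHead (x :: ·)

lemma splitOn_go_eq (c : Char) (fuel : Nat) (l cur : List Char) (acc : List (List Char))
    (hf : l.length ≤ fuel) :
    PySem.Chars.splitOn.go [c] fuel l cur acc
      = acc.reverse ++ (mySplit c l).modifyHead (cur.reverse ++ ·) := by
  induction fuel generalizing l cur acc with
  | zero =>
    have : l = [] := by cases l <;> simp_all
    subst this
    simp [PySem.Chars.splitOn.go, mySplit]
  | succ fuel ih =>
    cases l with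
    | nil => simp [PySem.Chars.splitOn.go, mySplit]
    | cons x r =>
      by_cases hx : x = c
      · subst hx
        rw [show PySem.Chars.splitOn.go [x] (fuel+1) (x::r) cur acc
              = PySem.Chars.splitOn.go [x] fuel r [] (cur.reverse :: acc) by
            simp [PySem.Chars.splitOn.go, List.isPrefixOf]]
        rw [ih r [] (cur.reverse :: acc) (by simpa using Nat.le_of_succ_le_succ (by simpa using hf))]
        simp [mySplit]
        cases h : mySplit x r <;> simp [List.modifyHead]
      · rw [show PySem.Chars.splitOn.go [c] (fuel+1) (x::r) cur acc
              = PySem.Chars.splitOn.go [c] fuel r (x :: cur) acc by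
            simp [PySem.Chars.splitOn.go, List.isPrefixOf, hx, Ne.symm]]
        rw [ih r (x :: cur) acc (by simpa using Nat.le_of_succ_le_succ (by simpa using hf))]
        simp [mySplit, hx, List.modifyHead_modifyHead]
        cases h : mySplit c r <;> simp [List.modifyHead]

lemma splitOn_eq (c : Char) (l : List Char) :
    PySem.Chars.splitOn l [c] = mySplit c l := by
  unfold PySem.Chars.splitOn
  rw [splitOn_go_eq c (l.length + 1) l [] [] (by omega)]
  cases h : mySplit c l with
  | nil => simp [List.modifyHead]
  | cons a b => simp [List.modifyHead]

lemma mySplit_ne_nil (c : Char) (l : List Char) : mySplit c l ≠ [] := by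
  cases l with
  | nil => simp [mySplit]
  | cons x r =>
    simp only [mySplit]
    split <;> simp [List.modifyHead_eq_nil_iff, mySplit_ne_nil c r]

lemma mySplit_no_sep (c : Char) (l : List Char) (h : c ∉ l) : mySplit c l = [l] := by
  induction l with
  | nil => rfl
  | cons x r ih =>
    simp at h
    simp [mySplit, Ne.symm h.1, ih h.2, List.modifyHead]

lemma mySplit_append (c : Char) (w r : List Char) (h : c ∉ w) :
    mySplit c (w ++ c :: r) = w :: mySplit c r := by
  induction w with
  | nil => simp [mySplit]
  | cons x v ih =>
    simp at h
    simp [mySplit, Ne.symm h.1, ih h.2, List.modifyHead]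

lemma strip_cons_space (ch : Char) (l : List Char) (h : PySem.Chars.isspace ch = true) :
    PySem.Chars.strip (ch :: l) = PySem.Chars.strip l := by
  simp [PySem.Chars.strip, PySem.Chars.lstrip, List.dropWhile_cons, h]

lemma strip_nil : PySem.Chars.strip [] = [] := rfl

lemma strip_cons_ne_nil (ch : Char) (l : List Char) (h : PySem.Chars.isspace ch = false) :
    PySem.Chars.strip (ch :: l) ≠ [] := by
  simp [PySem.Chars.strip, PySem.Chars.lstrip, PySem.Chars.rstrip, h]
  exact ⟨ch, Or.inr rfl, h⟩

lemma length_takeWhile_eq_of (p : Char → Bool) :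
    ∀ (u : List Char) (m : Nat), (∀ i, i < m → ∀ (hi : i < u.length), p u[i]) →
      ∀ (hm : m < u.length), p u[m] = false → (u.takeWhile p).length = m := by
  intro u
  induction u with
  | nil => intro m _ hm; simp at hm
  | cons x r ih =>
    intro m hall hm hfail
    cases m with
    | zero => simp at hfail; simp [List.takeWhile_cons, hfail]
    | succ m =>
      have hx : p x := hall 0 (by omega) (by simp)
      simp [List.takeWhile_cons, hx]
      exact ih m (fun i hi hlt => hall (i+1) (by omega) (by simpa using hlt)) (by simpa using hm)
        (by simpa using hfail)

lemma find_singleton (c : Char) (u : List Char) (h : c ∈ u) :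
    PySem.Chars.find u [c] = ((u.takeWhile (· ≠ c)).length : Int) := by
  have h0 : 0 ≤ PySem.Chars.find u [c] :=
    (PySem.Chars.find_nonneg_iff u [c]).mpr ((List.singleton_infix_iff c u).mpr h)
  obtain ⟨hpre, hmin⟩ := PySem.Chars.find_spec h0
  set m := (PySem.Chars.find u [c]).toNat with hm
  have hmlt : m < u.length := by
    by_contra hge
    push_neg at hge
    rw [List.drop_eq_nil_of_le hge] at hpre
    simp at hpre
  have hgetm : u[m] = c := by
    rw [List.drop_eq_getElem_cons hmlt] at hpre
    simp only [List.cons_prefix_cons] at hpre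
    exact hpre.1.symm
  have hlen : (u.takeWhile (· ≠ c)).length = m := by
    apply length_takeWhile_eq_of
    · intro i hi hilt
      have := hmin i hi
      rw [List.drop_eq_getElem_cons hilt] at this
      simp only [List.cons_prefix_cons, not_and] at this
      simp only [decide_eq_true_eq]
      intro hEq
      exact this hEq.symm ⟨_, rfl⟩
    · simp [hgetm]
    · exact hmlt
  rw [hlen]
  omega

lemma parseInner_eq (cs : List Char) (i : Nat) :
    parseInner cs i = i + ((cs.drop i).takeWhile (fun x => !decide (x = ',' ∨ x = '['))).length := by
  fun_induction parseInner cs i with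
  | case1 i h hcomma =>
    rw [List.drop_eq_getElem_cons h]
    have hb : (!decide (cs[i] = ',' ∨ cs[i] = '[')) = false := by simp [hcomma]
    simp only [List.takeWhile_cons, hb]
    simp
  | case2 i h hcomma ih =>
    rw [List.drop_eq_getElem_cons h]
    simp only [List.takeWhile_cons, hcomma, decide_false]
    simp only [decide_eq_true_eq] at *
    simp [hcomma, ih]
    omega
  | case3 i h =>
    rw [List.drop_eq_nil_of_le (by omega)]
    simp

lemma altLoop_skip (ch : Char) (t : List Char) (d : PySem.Dict String Int) (idx : Int)
    (hch : ch = ',' ∨ PySem.Chars.isspace ch) (hnb : ch ≠ '[') :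
    altLoop (ch :: t) d idx = altLoop t d idx := by
  have htw : (ch :: t).takeWhile (· ≠ '[') = ch :: t.takeWhile (· ≠ '[') := by
    simp [List.takeWhile_cons, hnb]
  have hdw : (ch :: t).dropWhile (· ≠ '[') = t.dropWhile (· ≠ '[') := by
    simp [List.dropWhile_cons, hnb]
  have hfold :
      (PySem.Chars.splitOn (ch :: t.takeWhile (· ≠ '[')) [',']).foldl altBareStep (d, idx)
        = (PySem.Chars.splitOn (t.takeWhile (· ≠ '[')) [',']).foldl altBareStep (d, idx) := by
    rw [splitOn_eq, splitOn_eq]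
    rcases hch with hc | hs
    · subst hc
      simp [mySplit, altBareStep, strip_nil]
    · have hc' : ch ≠ ',' := by rintro rfl; simp [PySem.Chars.isspace] at hs
      simp only [mySplit, if_neg hc']
      obtain ⟨b0, brest, hb⟩ : ∃ b0 brest, mySplit ',' (t.takeWhile (· ≠ '[')) = b0 :: brest := by
        cases h : mySplit ',' (t.takeWhile (· ≠ '[')) with
        | nil => exact absurd h (mySplit_ne_nil _ _)
        | cons a b => exact ⟨a, b, rfl⟩
      rw [hb]
      simp only [List.modifyHead, List.foldl_cons]
      congr 1
      simp only [altBareStep, strip_cons_space ch b0 hs]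
  rw [altLoop.eq_def, altLoop.eq_def]
  simp only [htw, hdw, hfold]

lemma altLoop_token (c : Char) (run' u : List Char) (d : PySem.Dict String Int) (idx : Int)
    (hc : ¬(c = ',' ∨ c = '[')) (hcs : PySem.Chars.isspace c = false)
    (hrun' : ∀ x ∈ run', ¬(x = ',' ∨ x = '['))
    (hu : u = [] ∨ (∃ v, u = ',' :: v) ∨ (∃ v, u = '[' :: v)) :
    altLoop ((c :: run') ++ u) d idx
      = altLoop u (d.insert (String.ofList (PySem.Chars.strip (c :: run'))) idx) (idx + 1) := by
  have hallb : ∀ x ∈ c :: run', (fun x => decide (x ≠ '[')) x = true := by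
    intro x hx
    rcases List.mem_cons.mp hx with rfl | hx
    · simp; tauto
    · have := hrun' x hx; simp; tauto
  have hnocomma : ',' ∉ c :: run' := by
    intro hx
    rcases List.mem_cons.mp hx with h | hx
    · exact hc (Or.inl h.symm)
    · exact hrun' _ hx (Or.inl rfl)
  have hstrip := strip_cons_ne_nil c run' hcs
  have hstep : altBareStep (d, idx) (c :: run')
      = (d.insert (String.ofList (PySem.Chars.strip (c :: run'))) idx, idx + 1) := by
    simp [altBareStep, hstrip]
  rcases hu with rfl | ⟨v, rfl⟩ | ⟨v, rfl⟩
  · -- u = []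
    rw [altLoop.eq_def, altLoop.eq_def]
    simp only [List.append_nil, List.takeWhile_eq_self_iff.mpr hallb,
      List.dropWhile_eq_nil_iff.mpr hallb, splitOn_eq, mySplit_no_sep _ _ hnocomma,
      List.foldl_cons, List.foldl_nil, hstep]
    simp [mySplit, altBareStep, strip_nil]
  · -- u = ',' :: v
    rw [altLoop_skip ',' v _ _ (Or.inl rfl) (by decide)]
    rw [altLoop.eq_def, altLoop.eq_def]
    have htw : ((c :: run') ++ ',' :: v).takeWhile (· ≠ '[')
        = (c :: run') ++ ',' :: v.takeWhile (· ≠ '[') := by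
      rw [List.takeWhile_append_of_pos hallb]
      simp [List.takeWhile_cons]
    have hdw : ((c :: run') ++ ',' :: v).dropWhile (· ≠ '[')
        = v.dropWhile (· ≠ '[') := by
      rw [List.dropWhile_append_of_pos hallb]
      simp [List.dropWhile_cons]
    have hsplit : mySplit ',' ((c :: run') ++ ',' :: v.takeWhile (· ≠ '['))
        = (c :: run') :: mySplit ',' (v.takeWhile (· ≠ '[')) :=
      mySplit_append _ _ _ hnocomma
    simp only [htw, hdw, splitOn_eq, hsplit, List.foldl_cons, hstep]
  · -- u = '[' :: v
    rw [altLoop.eq_def, altLoop.eq_def]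
    have htw : ((c :: run') ++ '[' :: v).takeWhile (· ≠ '[') = c :: run' := by
      rw [List.takeWhile_append_of_pos hallb]
      simp [List.takeWhile_cons]
    have hdw : ((c :: run') ++ '[' :: v).dropWhile (· ≠ '[') = '[' :: v := by
      rw [List.dropWhile_append_of_pos hallb]
      simp [List.dropWhile_cons]
    simp only [htw, hdw, splitOn_eq, mySplit_no_sep _ _ hnocomma, List.foldl_cons,
      List.foldl_nil, hstep, List.takeWhile_cons, List.dropWhile_cons]
    simp [mySplit, altBareStep, strip_nil]

lemma dropWhile_cons_pred {p : Char → Bool} {l : List Char} {x : Char} {xs : List Char}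
    (h : l.dropWhile p = x :: xs) : p x = false := by
  have hne : l.dropWhile p ≠ [] := by simp [h]
  have h2 : (l.dropWhile p).head hne = x := by simp [h]
  rw [← h2]
  exact List.head_dropWhile_not p hne

lemma altLoop_nil (d : PySem.Dict String Int) (idx : Int) : altLoop [] d idx = d := by
  rw [altLoop.eq_def]
  simp [splitOn_eq, mySplit, altBareStep, strip_nil]

lemma fold_insert_eq (l : List (List Char)) (d : PySem.Dict String Int) (idx : Int) :
    ((l.map PySem.Chars.strip).filter (· ≠ [])).foldl
        (fun acc tok => acc.insert (String.ofList tok) idx) d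
      = l.foldl (fun d t =>
          let t' := PySem.Chars.strip t
          if t' = [] then d else d.insert (String.ofList t') idx) d := by
  rw [List.foldl_filter, List.foldl_map]
  congr 1
  funext acc t
  by_cases ht : PySem.Chars.strip t = [] <;> simp [ht]

lemma main_lemma (cs : List Char)
    (hpre : ∀ i < cs.length, cs[i]? = some '[' → ∃ j < cs.length, i ≤ j ∧ cs[j]? = some ']') :
    ∀ (fuel i : Nat) (d : PySem.Dict String Int) (idx : Int), cs.length - i ≤ fuel →
      parseLoop fuel cs i d idx = altLoop (cs.drop i) d idx := by
  intro fuel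
  induction fuel with
  | zero =>
    intro i d idx hf
    rw [List.drop_eq_nil_of_le (by omega), altLoop_nil]
    rfl
  | succ fuel ih =>
    intro i d idx hf
    by_cases h : i < cs.length
    case neg =>
      rw [List.drop_eq_nil_of_le (by omega), altLoop_nil]
      simp [parseLoop, h]
    case pos =>
    have hdropi : cs.drop i = cs[i] :: cs.drop (i + 1) := List.drop_eq_getElem_cons h
    by_cases hbr : cs[i] = '['
    · -- bracket-group case
      -- find the closing bracket from Pre_parse
      obtain ⟨j0, hj0lt, hij0, hj0⟩ := hpre i h (by rw [List.getElem?_eq_getElem h, hbr])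
      rw [List.getElem?_eq_getElem hj0lt] at hj0
      have hj0get : cs[j0] = ']' := by simpa using hj0
      have hj0i : i + 1 ≤ j0 := by
        rcases Nat.lt_or_ge j0 (i+1) with hlt | hge
        · exfalso
          have : j0 = i := by omega
          subst this
          rw [hbr] at hj0get
          exact absurd hj0get (by decide)
        · exact hge
      have hmem : ']' ∈ cs.drop (i + 1) := by
        have h1 : ']' ∈ cs.drop j0 := by
          rw [List.drop_eq_getElem_cons hj0lt, hj0get]
          exact List.mem_cons_self
        have h2 : cs.drop j0 = (cs.drop (i+1)).drop (j0 - (i+1)) := by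
          rw [List.drop_drop]
          congr 1
          omega
        rw [h2] at h1
        exact List.mem_of_mem_drop h1
      set t' := cs.drop (i + 1) with ht'
      set tw := t'.takeWhile (· ≠ ']') with htw
      set cl := tw.length with hcl
      -- the value of s.find(']', i)
      have hfindrel : PySem.Chars.find (cs.drop i) [']']
          = (((cs.drop i).takeWhile (· ≠ ']')).length : Int) :=
        find_singleton ']' (cs.drop i) (by rw [hdropi]; exact List.mem_cons_of_mem _ hmem)
      have htwcons : (cs.drop i).takeWhile (· ≠ ']') = cs[i] :: tw := by
        rw [hdropi, List.takeWhile_cons, if_pos (by simp [hbr])]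
      have hfind : PySem.Chars.find (cs.drop i) [']'] = ((cl + 1 : Nat) : Int) := by
        rw [hfindrel, htwcons]
        simp [hcl]
      have hfrom : PySem.Chars.findFrom cs [']'] (i : Int) = ((i + cl + 1 : Nat) : Int) := by
        rw [PySem.Chars.findFrom_natCast cs [']'] i (by omega), hfind]
        rw [if_neg (by omega)]
        push_cast
        ring
      -- content = tw
      have hj1 : ((i + cl + 1 : Nat) : Int) ≠ -1 := by omega
      have htwpre : tw <+: t' := List.takeWhile_prefix _
      have hcontent : PySem.Chars.slice cs (some ((i : Int) + 1)) (some ((i + cl + 1 : Nat) : Int)) = tw := by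
        rw [show ((i : Int) + 1) = ((i + 1 : Nat) : Int) by push_cast; ring]
        rw [PySem.Chars.slice_eq_listSlice, PySem.List.slice_natCast]
        rw [show i + cl + 1 - (i + 1) = cl by omega, ← ht']
        exact (List.prefix_iff_eq_take.mp htwpre).symm
      -- remaining string after the group
      have hdwne : t'.dropWhile (· ≠ ']') ≠ [] := by
        intro hnil
        rw [List.dropWhile_eq_nil_iff] at hnil
        have := hnil ']' hmem
        simp at this
      obtain ⟨x, r3, hdw⟩ : ∃ x r3, t'.dropWhile (· ≠ ']') = x :: r3 := by
        cases hh : t'.dropWhile (· ≠ ']') with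
        | nil => exact absurd hh hdwne
        | cons a b => exact ⟨a, b, rfl⟩
      have hx : x = ']' := by
        have := dropWhile_cons_pred hdw
        simpa using this
      have hdroprec : cs.drop ((i + cl + 1) + 1) = r3 := by
        have h1 : t'.drop (cl + 1) = cs.drop ((i + cl + 1) + 1) := by
          rw [ht', List.drop_drop]
          congr 1
          omega
        rw [← h1]
        conv_lhs => rw [← List.takeWhile_append_dropWhile (p := (· ≠ ']')) (l := t'), ← htw, hdw]
        rw [show cl + 1 = tw.length + 1 from rfl]
        rw [List.drop_length_add_append]
        simp
      -- unfold A's step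
      rw [parseLoop]
      rw [dif_pos h, if_pos hbr]
      simp only [hfrom, if_neg hj1, hcontent, Int.toNat_natCast]
      -- unfold B's step
      conv_rhs => rw [hdropi, altLoop.eq_def]
      have htwB : (cs[i] :: t').takeWhile (· ≠ '[') = [] := by
        rw [List.takeWhile_cons, if_neg (by simp [hbr])]
      have hdwB : (cs[i] :: t').dropWhile (· ≠ '[') = cs[i] :: t' := by
        rw [List.dropWhile_cons, if_neg (by simp [hbr])]
      simp only [htwB, hdwB, List.tail_cons]
      rw [hdw]
      rw [dif_neg (List.cons_ne_nil _ _), dif_neg (List.cons_ne_nil _ _)]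
      simp only [List.tail_cons, splitOn_eq, mySplit, List.foldl_cons, List.foldl_nil]
      have hinit : altBareStep (d, idx) [] = (d, idx) := by
        simp [altBareStep, strip_nil]
      rw [hinit, fold_insert_eq]
      rw [ih (i + cl + 1 + 1) _ _ (by omega), hdroprec]
    · -- no bracket at position i
      by_cases hsp : cs[i] = ',' ∨ PySem.Chars.isspace cs[i]
      · -- separator / whitespace: skip one character
        rw [parseLoop, dif_pos h, if_neg hbr, if_pos hsp]
        rw [ih (i + 1) d idx (by omega)]
        rw [hdropi, altLoop_skip cs[i] _ _ _ hsp hbr]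
      · -- bare token
        have hcomma : cs[i] ≠ ',' := fun hh => hsp (Or.inl hh)
        have hspace : PySem.Chars.isspace cs[i] = false := by
          cases hhh : PySem.Chars.isspace cs[i]
          · rfl
          · exact absurd (Or.inr (by rw [hhh])) hsp
        have hqhead : (fun x => !decide (x = ',' ∨ x = '[')) cs[i] = true := by
          simp
          exact ⟨hcomma, hbr⟩
        set run' := ((cs.drop (i + 1)).takeWhile (fun x => !decide (x = ',' ∨ x = '['))) with hrun'
        set u := ((cs.drop (i + 1)).dropWhile (fun x => !decide (x = ',' ∨ x = '['))) with hu'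
        have hsplitapp : cs.drop (i + 1) = run' ++ u := (List.takeWhile_append_dropWhile).symm
        have hstop : parseInner cs i = i + (cs[i] :: run').length := by
          rw [parseInner_eq, hdropi, List.takeWhile_cons, if_pos hqhead]
        have hrunpre : (cs[i] :: run') <+: cs.drop i := by
          rw [hdropi]
          exact List.cons_prefix_cons.mpr ⟨rfl, List.takeWhile_prefix _⟩
        have hslice : PySem.Chars.slice cs (some (i : Int))
            (some ((i + (cs[i] :: run').length : Nat) : Int)) = cs[i] :: run' := by
          rw [show ((i : Nat) : Int) = ((i : Nat) : Int) from rfl]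
          rw [PySem.Chars.slice_eq_listSlice, PySem.List.slice_natCast]
          rw [show i + (cs[i] :: run').length - i = (cs[i] :: run').length by omega]
          exact (List.prefix_iff_eq_take.mp hrunpre).symm
        have htok : PySem.Chars.strip (cs[i] :: run') ≠ [] := strip_cons_ne_nil _ _ hspace
        -- unfold A's step
        rw [parseLoop, dif_pos h, if_neg hbr, if_neg hsp]
        simp only [hstop, hslice, if_neg htok]
        rw [ih (i + (cs[i] :: run').length) _ _ (by simp only [List.length_cons]; omega)]
        have hdropu : cs.drop (i + (cs[i] :: run').length) = u := by
          have h1 : cs.drop (i + (cs[i] :: run').length) = (cs.drop (i + 1)).drop run'.length := by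
            rw [List.drop_drop]
            congr 1
            simp only [List.length_cons]
            omega
          rw [h1, hsplitapp, List.drop_left]
        rw [hdropu]
        -- unfold B's side
        rw [hdropi]
        conv_rhs => rw [hsplitapp, ← List.cons_append]
        rw [altLoop_token cs[i] run' u d idx (by tauto) hspace
          (fun x hx => by
            have := List.mem_takeWhile_imp hx
            simp at this
            tauto)
          (by
            cases hcu : u with
            | nil => exact Or.inl rfl
            | cons y ys =>
              have := dropWhile_cons_pred (hu'.symm ▸ hcu)
              simp at this
              by_cases hy : y = ','
              · exact Or.inr (Or.inl ⟨ys, by rw [hy]⟩)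
              · exact Or.inr (Or.inr ⟨ys, by rw [this hy]⟩))]

-- ===== VERDICT (by name: the statement is the Claim_ definition above) =====
theorem parse_spec : Claim_equal_parse := by
  intro s _ hpre
  unfold Spec_parse parse parse_alt
  rw [main_lemma s.toList hpre (s.toList.length + 1) 0 PySem.Dict.empty 0 (by omega)]
  simp
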